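-- pv_equiv track=rewrite | github.com/neko0774/competitive | atcoder/abc/abc242/e/main.py | solve
-- ===== SOURCE A (Python) =====
-- mod = 998244353
--
-- def solve(S, N):
--     ret = 0
--     x = N//2
--     front = S[:x]
--     back = S[-x:]
--
--     change = 0 if front[::-1] > back else 1
--     for i in front:
--         ret = (ret*26+ord(i)-ord("A"))%mod
--     if N%2==1:
--         return (ord(S[x])-ord("A")+ret*26+change)%mod
--     else:
--         return (ret+change)%mod
-- ===== SOURCE B (Python) =====
-- mod = 998244353
--
-- def solve(S, N):
--     x = N // 2
--     change = 0 if S[:x][::-1] > S[-x:] else 1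
--     half = S[:x] + (S[x] if N % 2 == 1 else "")
--     # divide and conquer: value of a segment and 26^len(segment), both mod p
--     def dc(h):
--         if len(h) == 0:
--             return (0, 1)
--         if len(h) == 1:
--             return ((ord(h) - 65) % mod, 26)
--         m = len(h) // 2
--         vl, pl = dc(h[:m])
--         vr, pr = dc(h[m:])
--         return ((vl * pr + vr) % mod, pl * pr % mod)
--     val, _ = dc(half)
--     return (val + change) % mod
-- ===== Notes on version B (the rewrite author's own statement) =====
-- stated objective: alternative
-- what changed: Replaces A's left-to-right Horner fold with per-step mod and separate odd/even return branches by building the palindrome half once and evaluating its base-26 value with a recursive divide-and-conquer that splits the half at its midpoint and combines (value mod p, 26^len mod p) pairs.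
import Mathlib
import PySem

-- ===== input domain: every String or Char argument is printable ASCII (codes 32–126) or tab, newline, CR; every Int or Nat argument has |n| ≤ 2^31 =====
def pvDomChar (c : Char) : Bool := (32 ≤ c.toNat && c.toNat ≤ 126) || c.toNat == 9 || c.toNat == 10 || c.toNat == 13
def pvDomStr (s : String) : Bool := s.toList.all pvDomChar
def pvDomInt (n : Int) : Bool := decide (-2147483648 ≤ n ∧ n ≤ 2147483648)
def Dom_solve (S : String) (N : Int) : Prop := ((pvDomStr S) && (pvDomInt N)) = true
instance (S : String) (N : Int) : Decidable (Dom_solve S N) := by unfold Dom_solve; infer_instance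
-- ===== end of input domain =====

-- B replaces A's left-to-right Horner fold (with odd/even return branch) by a
-- divide-and-conquer that combines (value mod p, 26^len mod p) pairs over the
-- palindrome half (objective: alternative decomposition, same cost).

-- ===== PORT A =====
-- literal transliteration of Source A's solve
def solve (S : String) (N : Int) : Int :=
  let x := PySem.Int.floordiv N 2
  let front := PySem.List.slice S.toList none (some x)
  let back := PySem.List.slice S.toList (some (-x)) none
  -- change = 0 if front[::-1] > back else 1
  let change : Int :=
    if back < ((PySem.List.slice? front none none (-1)).getD []) then 0 else 1
  let ret := front.foldl
    (fun r c => PySem.Int.mod (r * 26 + ((c.toNat : Int) - 65)) 998244353) 0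
  if PySem.Int.mod N 2 = 1 then
    match PySem.List.pyGet? S.toList x with
    | some c => PySem.Int.mod (((c.toNat : Int) - 65) + ret * 26 + change) 998244353
    | none => 0  -- Python raises IndexError here; excluded by Pre_solve
  else
    PySem.Int.mod (ret + change) 998244353

-- ===== PORT B =====
-- the combine step of Source B's dc: ((vl*pr+vr)%mod, pl*pr%mod)
def dcCombine (L R : Int × Int) : Int × Int :=
  (PySem.Int.mod (L.1 * R.2 + R.1) 998244353, PySem.Int.mod (L.2 * R.2) 998244353)

-- Source B's inner dc: divide and conquer on the half, returning (value mod p, 26^len mod p)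
def dcB : List Char → Int × Int
  | [] => (0, 1)
  | [c] => (PySem.Int.mod ((c.toNat : Int) - 65) 998244353, 26)
  | c :: d :: t =>
    dcCombine (dcB ((c :: d :: t).take ((c :: d :: t).length / 2)))
              (dcB ((c :: d :: t).drop ((c :: d :: t).length / 2)))
termination_by l => l.length
decreasing_by
  · simp only [List.length_take, List.length_cons]; omega
  · simp only [List.length_drop, List.length_cons]; omega

-- literal transliteration of Source B's solve
def solve_alt (S : String) (N : Int) : Int :=
  let x := PySem.Int.floordiv N 2
  let change : Int :=
    if PySem.List.slice S.toList (some (-x)) none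
        < ((PySem.List.slice? (PySem.List.slice S.toList none (some x)) none none (-1)).getD [])
    then 0 else 1
  let half := PySem.List.slice S.toList none (some x) ++
    (if PySem.Int.mod N 2 = 1 then (PySem.List.pyGet? S.toList x).toList else [])
    -- S[x] raises IndexError where pyGet? is none; excluded by Pre_solve
  let val := (dcB half).1
  PySem.Int.mod (val + change) 998244353

-- ===== PRECONDITION & SPEC =====
-- Pre_ excludes exactly the inputs where A raises IndexError: N odd (Python %) with S[N//2] out of range.
def Pre_solve (S : String) (N : Int) : Prop :=
  PySem.Int.mod N 2 = 1 → PySem.Raise.InRange S.toList.length (PySem.Int.floordiv N 2)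
instance (S : String) (N : Int) : Decidable (Pre_solve S N) := by unfold Pre_solve; infer_instance
def pvWitness_solve : String × Int := ("ABC", 3)

def Spec_solve (S : String) (N : Int) (out : Int) : Prop := out = solve_alt S N
instance (S : String) (N : Int) (out : Int) : Decidable (Spec_solve S N out) := by unfold Spec_solve; infer_instance

-- ===== CLAIM (what is proved, stated in full; the proofs are below) =====
def Claim_equal_solve : Prop := ∀ (S : String) (N : Int), Dom_solve S N → Pre_solve S N → Spec_solve S N (solve S N)

-- ===== LEMMAS AND PROOFS =====

-- value of a char, and the exact (un-reduced) base-26 polynomial value of a list of chars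
def pvVal (c : Char) : Int := (c.toNat : Int) - 65
def pvPoly (l : List Char) : Int := l.foldl (fun r c => r * 26 + pvVal c) 0

theorem pvPoly_foldl (l : List Char) (a : Int) :
    l.foldl (fun r c => r * 26 + pvVal c) a = a * 26 ^ l.length + pvPoly l := by
  induction l generalizing a with
  | nil => simp [pvPoly]
  | cons c t ih =>
    rw [List.foldl_cons, ih]
    conv_rhs => rw [pvPoly, List.foldl_cons]
    rw [ih]
    simp only [List.length_cons]
    ring

theorem pvPoly_append (a b : List Char) :
    pvPoly (a ++ b) = pvPoly a * 26 ^ b.length + pvPoly b := by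
  rw [pvPoly, List.foldl_append, pvPoly_foldl]
  rfl

theorem pvPoly_append_singleton (l : List Char) (c : Char) :
    pvPoly (l ++ [c]) = pvPoly l * 26 + pvVal c := by
  simp [pvPoly, List.foldl_append]

-- A's Horner loop computes pvPoly mod p
theorem horner_mod (l : List Char) (a : Int) :
    l.foldl (fun r c => (r * 26 + ((c.toNat : Int) - 65)) % 998244353) (a % 998244353)
      = (l.foldl (fun r c => r * 26 + pvVal c) a) % 998244353 := by
  induction l generalizing a with
  | nil => simp
  | cons c t ih =>
    simp only [List.foldl_cons]
    rw [show (a % 998244353 * 26 + ((c.toNat : Int) - 65)) % 998244353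
          = (a * 26 + pvVal c) % 998244353 by
        simp [pvVal, Int.add_emod, Int.mul_emod, Int.emod_emod_of_dvd]]
    exact ih (a * 26 + pvVal c)

-- B's divide-and-conquer returns (pvPoly mod p, 26^len mod p)
theorem dcB_eq (l : List Char) :
    dcB l = (pvPoly l % 998244353, 26 ^ l.length % 998244353) := by
  fun_induction dcB with
  | case1 => simp [pvPoly]
  | case2 c =>
    simp [pvPoly, pvVal]
  | case3 c d t ihL ihR =>
    rw [dcCombine, ihL, ihR,
        PySem.Int.mod_eq_emod_of_pos (by norm_num : (0:Int) < 998244353),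
        PySem.Int.mod_eq_emod_of_pos (by norm_num : (0:Int) < 998244353)]
    have hsplit : pvPoly (c :: d :: t)
        = pvPoly ((c :: d :: t).take ((c :: d :: t).length / 2)) *
            26 ^ ((c :: d :: t).drop ((c :: d :: t).length / 2)).length +
          pvPoly ((c :: d :: t).drop ((c :: d :: t).length / 2)) := by
      conv_lhs => rw [← List.take_append_drop ((c :: d :: t).length / 2) (c :: d :: t)]
      exact pvPoly_append _ _
    have hlen : (26 : Int) ^ (c :: d :: t).length
        = 26 ^ ((c :: d :: t).take ((c :: d :: t).length / 2)).length *
          26 ^ ((c :: d :: t).drop ((c :: d :: t).length / 2)).length := by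
      rw [← pow_add]
      congr 1
      simp only [List.length_take, List.length_drop, List.length_cons]
      omega
    dsimp only
    rw [Prod.mk.injEq]
    constructor
    · rw [hsplit]
      simp [Int.add_emod, Int.mul_emod, Int.emod_emod_of_dvd]
    · rw [hlen]
      simp [Int.mul_emod]

-- mod shuffling for A's odd-case return value
theorem odd_shuffle (P vc ch : Int) :
    (vc + (P % 998244353) * 26 + ch) % 998244353 = (P * 26 + vc + ch) % 998244353 := by
  conv_rhs => rw [show P * 26 + vc + ch = vc + P * 26 + ch by ring]
  simp [Int.add_emod, Int.mul_emod, Int.emod_emod_of_dvd]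

-- ===== VERDICT (by name: the statement is the Claim_ definition above) =====
theorem solve_spec : Claim_equal_solve := by
  intro S N _ hpre
  unfold Spec_solve solve solve_alt
  simp only [PySem.Int.mod_eq_emod_of_pos (by norm_num : (0:Int) < 998244353)]
  have hH := horner_mod (PySem.List.slice S.toList none (some (PySem.Int.floordiv N 2))) 0
  rw [show ((0:Int) % 998244353) = 0 by norm_num] at hH
  by_cases hodd : PySem.Int.mod N 2 = 1
  · obtain ⟨c, hc⟩ : ∃ c, PySem.List.pyGet? S.toList (PySem.Int.floordiv N 2) = some c := by
      have hin := hpre hodd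
      rcases h : PySem.List.pyGet? S.toList (PySem.Int.floordiv N 2) with _ | c
      · exact absurd hin (by rwa [← PySem.List.pyGet?_eq_none_iff])
      · exact ⟨c, rfl⟩
    simp only [hodd, if_pos, hc, Option.toList_some, dcB_eq]
    rw [hH, Int.emod_add_emod, odd_shuffle, pvPoly_append_singleton, pvVal]
    rfl
  · simp only [hodd, if_false, List.append_nil, dcB_eq]
    rw [hH, Int.emod_add_emod, Int.emod_add_emod]
    rfl
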